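-- pv_equiv track=rewrite | github.com/SanthoshiMary/careerfit-analyzer | Resume_skill_Match_analyzer/backend/app.py | semantic_matches_from_lists
-- ===== SOURCE A (Python) =====
-- def semantic_matches_from_lists(resume_skills, job_skills):
--     semantic_groups = [
--         {"sql", "postgresql"},
--         {"react", "reactjs"},
--         {"machine learning", "ml"},
--         {"rest api", "api development"}
--     ]
--
--     matches = set()
--
--     for r in resume_skills:
--         for j in job_skills:
--             if r == j:
--                 continue
--
--             for group in semantic_groups:
--                 if r in group and j in group:
--                     pair = " ~ ".join(sorted([r, j]))
--                     matches.add(pair)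
--
--     return sorted(list(matches))
-- ===== SOURCE B (Python) =====
-- def semantic_matches_from_lists(resume_skills, job_skills):
--     # Pre-labelled semantic pairs, listed in sorted label order, so one
--     # membership pass over 4 pairs replaces the O(R*J) double loop.
--     groups = [
--         ("api development", "rest api", "api development ~ rest api"),
--         ("machine learning", "ml", "machine learning ~ ml"),
--         ("postgresql", "sql", "postgresql ~ sql"),
--         ("react", "reactjs", "react ~ reactjs"),
--     ]
--     rs = set(resume_skills)
--     js = set(job_skills)
--     return [label for a, b, label in groups
--             if (a in rs and b in js) or (b in rs and a in js)]
-- ===== Notes on version B (the rewrite author's own statement) =====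
-- stated objective: faster
-- what changed: Replaced the O(R*J*G) triple nested loop with a single membership test per fixed semantic pair (each group has exactly two skills, so a match for a group is just 'one side in resume set, other in job set'), emitting the pre-sorted labels directly.
import Mathlib
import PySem

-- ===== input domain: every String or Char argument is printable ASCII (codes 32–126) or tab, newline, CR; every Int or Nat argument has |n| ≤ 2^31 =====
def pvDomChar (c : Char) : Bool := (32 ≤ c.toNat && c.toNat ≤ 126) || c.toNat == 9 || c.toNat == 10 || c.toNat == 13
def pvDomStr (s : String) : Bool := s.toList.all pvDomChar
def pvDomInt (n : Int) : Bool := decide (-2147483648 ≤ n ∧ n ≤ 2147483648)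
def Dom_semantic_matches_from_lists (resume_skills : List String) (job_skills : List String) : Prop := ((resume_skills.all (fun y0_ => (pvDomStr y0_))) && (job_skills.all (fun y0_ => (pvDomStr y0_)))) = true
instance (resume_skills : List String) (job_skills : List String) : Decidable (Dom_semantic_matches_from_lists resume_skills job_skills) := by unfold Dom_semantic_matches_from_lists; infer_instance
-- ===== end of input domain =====

-- B replaces A's nested loop over all resume/job skill pairs by one membership test per
-- fixed two-skill semantic group, emitting the pre-sorted labels directly.

-- ===== PORT A =====
def pvSemanticGroups : List (PySem.Set String) :=
  [PySem.Set.ofList ["sql", "postgresql"],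
   PySem.Set.ofList ["react", "reactjs"],
   PySem.Set.ofList ["machine learning", "ml"],
   PySem.Set.ofList ["rest api", "api development"]]

-- the inner 'for group in semantic_groups' loop body of A
def pvGroupFold (r j : String) (m : PySem.Set String) : PySem.Set String :=
  pvSemanticGroups.foldl (fun m group =>
    if PySem.Set.contains group r && PySem.Set.contains group j then
      PySem.Set.add m (PySem.Str.join " ~ " (PySem.List.sorted [r, j] (fun x => x) false))
    else m) m

def semantic_matches_from_lists (resume_skills : List String) (job_skills : List String) : List String :=
  PySem.List.sorted
    (resume_skills.foldl (fun m r =>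
      job_skills.foldl (fun m j => if r == j then m else pvGroupFold r j m) m)
      PySem.Set.empty)
    (fun x => x) false

-- ===== PORT B =====
-- pre-labelled semantic pairs, listed in sorted label order
def pvPairs : List (String × String × String) :=
  [("api development", "rest api", "api development ~ rest api"),
   ("machine learning", "ml", "machine learning ~ ml"),
   ("postgresql", "sql", "postgresql ~ sql"),
   ("react", "reactjs", "react ~ reactjs")]

def semantic_matches_from_lists_alt (resume_skills : List String) (job_skills : List String) : List String :=
  let rs : PySem.Set String := PySem.Set.ofList resume_skills
  let js : PySem.Set String := PySem.Set.ofList job_skills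
  (pvPairs.filter (fun g =>
      (PySem.Set.contains rs g.1 && PySem.Set.contains js g.2.1) ||
      (PySem.Set.contains rs g.2.1 && PySem.Set.contains js g.1))).map (fun g => g.2.2)

-- ===== PRECONDITION & SPEC =====
def Spec_semantic_matches_from_lists (resume_skills : List String) (job_skills : List String) (out : List String) : Prop := out = semantic_matches_from_lists_alt resume_skills job_skills
instance (resume_skills : List String) (job_skills : List String) (out : List String) : Decidable (Spec_semantic_matches_from_lists resume_skills job_skills out) := by unfold Spec_semantic_matches_from_lists; infer_instance

-- ===== CLAIM (what is proved, stated in full; the proofs are below) =====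
def Claim_equal_semantic_matches_from_lists : Prop := ∀ (resume_skills : List String) (job_skills : List String), Dom_semantic_matches_from_lists resume_skills job_skills → Spec_semantic_matches_from_lists resume_skills job_skills (semantic_matches_from_lists resume_skills job_skills)

-- ===== LEMMAS AND PROOFS =====

-- "some semantic pair is hit by resume skill r and job skill j, yielding label x"
def pvHit (r j x : String) : Prop :=
  ∃ g ∈ pvPairs, ((r = g.1 ∧ j = g.2.1) ∨ (r = g.2.1 ∧ j = g.1)) ∧ x = g.2.2

theorem pv_mem_ite_add {m : PySem.Set String} {s x : String} (c : Bool) :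
    x ∈ (if c then PySem.Set.add m s else m) ↔ x ∈ m ∨ (c = true ∧ x = s) := by
  cases c <;> simp [PySem.Set.mem_add]

theorem pvJoin1L : PySem.Str.join " ~ " (PySem.List.sorted ["api development", "rest api"] (fun x => x) false) = "api development ~ rest api" := by
  have hs : PySem.List.sorted ["api development", "rest api"] (fun x : String => x) false = ["api development", "rest api"] :=
    PySem.List.sorted_eq_of_perm_of_pairwise_lt _ _ _ (List.Perm.refl _) (by simp; decide)
  rw [hs]
  apply String.toList_inj.mp
  rw [PySem.Str.toList_join]
  decide
theorem pvJoin1R : PySem.Str.join " ~ " (PySem.List.sorted ["rest api", "api development"] (fun x => x) false) = "api development ~ rest api" := by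
  have hs : PySem.List.sorted ["rest api", "api development"] (fun x : String => x) false = ["api development", "rest api"] :=
    PySem.List.sorted_eq_of_perm_of_pairwise_lt _ _ _ (List.Perm.swap _ _ _) (by simp; decide)
  rw [hs]
  apply String.toList_inj.mp
  rw [PySem.Str.toList_join]
  decide
theorem pvJoin2L : PySem.Str.join " ~ " (PySem.List.sorted ["machine learning", "ml"] (fun x => x) false) = "machine learning ~ ml" := by
  have hs : PySem.List.sorted ["machine learning", "ml"] (fun x : String => x) false = ["machine learning", "ml"] :=
    PySem.List.sorted_eq_of_perm_of_pairwise_lt _ _ _ (List.Perm.refl _) (by simp; decide)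
  rw [hs]
  apply String.toList_inj.mp
  rw [PySem.Str.toList_join]
  decide
theorem pvJoin2R : PySem.Str.join " ~ " (PySem.List.sorted ["ml", "machine learning"] (fun x => x) false) = "machine learning ~ ml" := by
  have hs : PySem.List.sorted ["ml", "machine learning"] (fun x : String => x) false = ["machine learning", "ml"] :=
    PySem.List.sorted_eq_of_perm_of_pairwise_lt _ _ _ (List.Perm.swap _ _ _) (by simp; decide)
  rw [hs]
  apply String.toList_inj.mp
  rw [PySem.Str.toList_join]
  decide
theorem pvJoin3L : PySem.Str.join " ~ " (PySem.List.sorted ["postgresql", "sql"] (fun x => x) false) = "postgresql ~ sql" := by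
  have hs : PySem.List.sorted ["postgresql", "sql"] (fun x : String => x) false = ["postgresql", "sql"] :=
    PySem.List.sorted_eq_of_perm_of_pairwise_lt _ _ _ (List.Perm.refl _) (by simp; decide)
  rw [hs]
  apply String.toList_inj.mp
  rw [PySem.Str.toList_join]
  decide
theorem pvJoin3R : PySem.Str.join " ~ " (PySem.List.sorted ["sql", "postgresql"] (fun x => x) false) = "postgresql ~ sql" := by
  have hs : PySem.List.sorted ["sql", "postgresql"] (fun x : String => x) false = ["postgresql", "sql"] :=
    PySem.List.sorted_eq_of_perm_of_pairwise_lt _ _ _ (List.Perm.swap _ _ _) (by simp; decide)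
  rw [hs]
  apply String.toList_inj.mp
  rw [PySem.Str.toList_join]
  decide
theorem pvJoin4L : PySem.Str.join " ~ " (PySem.List.sorted ["react", "reactjs"] (fun x => x) false) = "react ~ reactjs" := by
  have hs : PySem.List.sorted ["react", "reactjs"] (fun x : String => x) false = ["react", "reactjs"] :=
    PySem.List.sorted_eq_of_perm_of_pairwise_lt _ _ _ (List.Perm.refl _) (by simp)
  rw [hs]
  apply String.toList_inj.mp
  rw [PySem.Str.toList_join]
  decide
theorem pvJoin4R : PySem.Str.join " ~ " (PySem.List.sorted ["reactjs", "react"] (fun x => x) false) = "react ~ reactjs" := by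
  have hs : PySem.List.sorted ["reactjs", "react"] (fun x : String => x) false = ["react", "reactjs"] :=
    PySem.List.sorted_eq_of_perm_of_pairwise_lt _ _ _ (List.Perm.swap _ _ _) (by simp)
  rw [hs]
  apply String.toList_inj.mp
  rw [PySem.Str.toList_join]
  decide
theorem pv_mem_pvGroupFold (r j x : String) (m : PySem.Set String) (hrj : r ≠ j) :
    x ∈ pvGroupFold r j m ↔ x ∈ m ∨ pvHit r j x := by
  unfold pvGroupFold pvSemanticGroups
  simp only [List.foldl_cons, List.foldl_nil]
  simp only [pv_mem_ite_add]
  simp only [Bool.and_eq_true, PySem.Set.contains_iff, PySem.Set.mem_ofList, List.mem_cons,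
    List.not_mem_nil, or_false]
  constructor
  · rintro ((((h | ⟨⟨hr, hj⟩, hx⟩) | ⟨⟨hr, hj⟩, hx⟩) | ⟨⟨hr, hj⟩, hx⟩) | ⟨⟨hr, hj⟩, hx⟩)
    · exact Or.inl h
    · rcases hr with hr | hr <;> rcases hj with hj | hj <;> subst hr <;> subst hj
      · exact absurd rfl hrj
      · exact Or.inr ⟨("postgresql", "sql", "postgresql ~ sql"), by simp [pvPairs],
          Or.inr ⟨rfl, rfl⟩, hx.trans pvJoin3R⟩
      · exact Or.inr ⟨("postgresql", "sql", "postgresql ~ sql"), by simp [pvPairs],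
          Or.inl ⟨rfl, rfl⟩, hx.trans pvJoin3L⟩
      · exact absurd rfl hrj
    · rcases hr with hr | hr <;> rcases hj with hj | hj <;> subst hr <;> subst hj
      · exact absurd rfl hrj
      · exact Or.inr ⟨("react", "reactjs", "react ~ reactjs"), by simp [pvPairs],
          Or.inl ⟨rfl, rfl⟩, hx.trans pvJoin4L⟩
      · exact Or.inr ⟨("react", "reactjs", "react ~ reactjs"), by simp [pvPairs],
          Or.inr ⟨rfl, rfl⟩, hx.trans pvJoin4R⟩
      · exact absurd rfl hrj
    · rcases hr with hr | hr <;> rcases hj with hj | hj <;> subst hr <;> subst hj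
      · exact absurd rfl hrj
      · exact Or.inr ⟨("machine learning", "ml", "machine learning ~ ml"), by simp [pvPairs],
          Or.inl ⟨rfl, rfl⟩, hx.trans pvJoin2L⟩
      · exact Or.inr ⟨("machine learning", "ml", "machine learning ~ ml"), by simp [pvPairs],
          Or.inr ⟨rfl, rfl⟩, hx.trans pvJoin2R⟩
      · exact absurd rfl hrj
    · rcases hr with hr | hr <;> rcases hj with hj | hj <;> subst hr <;> subst hj
      · exact absurd rfl hrj
      · exact Or.inr ⟨("api development", "rest api", "api development ~ rest api"), by simp [pvPairs],
          Or.inr ⟨rfl, rfl⟩, hx.trans pvJoin1R⟩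
      · exact Or.inr ⟨("api development", "rest api", "api development ~ rest api"), by simp [pvPairs],
          Or.inl ⟨rfl, rfl⟩, hx.trans pvJoin1L⟩
      · exact absurd rfl hrj
  · rintro (h | ⟨g, hg, hm, hx⟩)
    · exact Or.inl (Or.inl (Or.inl (Or.inl h)))
    · simp only [pvPairs, List.mem_cons, List.not_mem_nil, or_false] at hg
      rcases hg with hg | hg | hg | hg <;> subst hg <;>
        rcases hm with ⟨h1, h2⟩ | ⟨h1, h2⟩ <;> subst h1 <;> subst h2
      · exact Or.inr ⟨⟨Or.inr rfl, Or.inl rfl⟩, hx.trans pvJoin1L.symm⟩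
      · exact Or.inr ⟨⟨Or.inl rfl, Or.inr rfl⟩, hx.trans pvJoin1R.symm⟩
      · exact Or.inl (Or.inr ⟨⟨Or.inl rfl, Or.inr rfl⟩, hx.trans pvJoin2L.symm⟩)
      · exact Or.inl (Or.inr ⟨⟨Or.inr rfl, Or.inl rfl⟩, hx.trans pvJoin2R.symm⟩)
      · exact Or.inl (Or.inl (Or.inl (Or.inr ⟨⟨Or.inr rfl, Or.inl rfl⟩, hx.trans pvJoin3L.symm⟩)))
      · exact Or.inl (Or.inl (Or.inl (Or.inr ⟨⟨Or.inl rfl, Or.inr rfl⟩, hx.trans pvJoin3R.symm⟩)))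
      · exact Or.inl (Or.inl (Or.inr ⟨⟨Or.inl rfl, Or.inr rfl⟩, hx.trans pvJoin4L.symm⟩))
      · exact Or.inl (Or.inl (Or.inr ⟨⟨Or.inr rfl, Or.inl rfl⟩, hx.trans pvJoin4R.symm⟩))

theorem pv_mem_jobFold (J : List String) (r x : String) (m : PySem.Set String) :
    x ∈ J.foldl (fun m j => if r == j then m else pvGroupFold r j m) m ↔
      x ∈ m ∨ ∃ j ∈ J, r ≠ j ∧ pvHit r j x := by
  induction J generalizing m with
  | nil => simp
  | cons j J ih =>
    simp only [List.foldl_cons, ih, List.mem_cons]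
    by_cases h : r = j
    · subst h
      rw [if_pos (by simp)]
      constructor
      · rintro (hm | ⟨j', hj', hne, hh⟩)
        · exact Or.inl hm
        · exact Or.inr ⟨j', Or.inr hj', hne, hh⟩
      · rintro (hm | ⟨j', hj' | hj', hne, hh⟩)
        · exact Or.inl hm
        · exact absurd hj'.symm hne
        · exact Or.inr ⟨j', hj', hne, hh⟩
    · rw [if_neg (by simpa using h), pv_mem_pvGroupFold r j x m h]
      constructor
      · rintro ((hm | hh) | ⟨j', hj', hne, hh⟩)
        · exact Or.inl hm
        · exact Or.inr ⟨j, Or.inl rfl, h, hh⟩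
        · exact Or.inr ⟨j', Or.inr hj', hne, hh⟩
      · rintro (hm | ⟨j', hj' | hj', hne, hh⟩)
        · exact Or.inl (Or.inl hm)
        · subst hj'; exact Or.inl (Or.inr hh)
        · exact Or.inr ⟨j', hj', hne, hh⟩

theorem pv_mem_resumeFold (R J : List String) (x : String) (m : PySem.Set String) :
    x ∈ R.foldl (fun m r => J.foldl (fun m j => if r == j then m else pvGroupFold r j m) m) m ↔
      x ∈ m ∨ ∃ r ∈ R, ∃ j ∈ J, r ≠ j ∧ pvHit r j x := by
  induction R generalizing m with
  | nil => simp
  | cons r R ih =>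
    simp only [List.foldl_cons, ih, pv_mem_jobFold, List.mem_cons]
    constructor
    · rintro ((hm | hh) | ⟨r', hr', hh⟩)
      · exact Or.inl hm
      · exact Or.inr ⟨r, Or.inl rfl, hh⟩
      · exact Or.inr ⟨r', Or.inr hr', hh⟩
    · rintro (hm | ⟨r', hr' | hr', hh⟩)
      · exact Or.inl (Or.inl hm)
      · subst hr'; exact Or.inl (Or.inr hh)
      · exact Or.inr ⟨r', hr', hh⟩

theorem pv_nodup_ite_add {m : PySem.Set String} {s : String} (c : Bool) (h : m.Nodup) :
    (if c then PySem.Set.add m s else m).Nodup := by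
  split
  · exact PySem.Set.nodup_add _ _ h
  · exact h

theorem pv_nodup_pvGroupFold (r j : String) (m : PySem.Set String) (h : m.Nodup) :
    (pvGroupFold r j m).Nodup := by
  unfold pvGroupFold pvSemanticGroups
  simp only [List.foldl_cons, List.foldl_nil]
  exact pv_nodup_ite_add _ (pv_nodup_ite_add _ (pv_nodup_ite_add _ (pv_nodup_ite_add _ h)))

theorem pv_nodup_jobFold (J : List String) (r : String) (m : PySem.Set String) (h : m.Nodup) :
    (J.foldl (fun m j => if r == j then m else pvGroupFold r j m) m).Nodup := by
  induction J generalizing m with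
  | nil => exact h
  | cons j J ih =>
    simp only [List.foldl_cons]
    apply ih
    by_cases hb : (r == j) = true
    · rw [if_pos hb]; exact h
    · rw [if_neg hb]; exact pv_nodup_pvGroupFold r j m h

theorem pv_nodup_resumeFold (R J : List String) (m : PySem.Set String) (h : m.Nodup) :
    (R.foldl (fun m r => J.foldl (fun m j => if r == j then m else pvGroupFold r j m) m) m).Nodup := by
  induction R generalizing m with
  | nil => exact h
  | cons r R ih =>
    simp only [List.foldl_cons]
    exact ih _ (pv_nodup_jobFold J r m h)

theorem pv_mem_alt (R J : List String) (x : String) :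
    x ∈ semantic_matches_from_lists_alt R J ↔
      ∃ g ∈ pvPairs, ((g.1 ∈ R ∧ g.2.1 ∈ J) ∨ (g.2.1 ∈ R ∧ g.1 ∈ J)) ∧ x = g.2.2 := by
  unfold semantic_matches_from_lists_alt
  simp only [List.mem_map, List.mem_filter, Bool.or_eq_true, Bool.and_eq_true,
    PySem.Set.contains_iff, PySem.Set.mem_ofList]
  constructor
  · rintro ⟨g, ⟨hg, hc⟩, hx⟩
    exact ⟨g, hg, hc, hx.symm⟩
  · rintro ⟨g, hg, hc, hx⟩
    exact ⟨g, ⟨hg, hc⟩, hx.symm⟩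

theorem pv_hit_swap (R J : List String) (x : String) :
    (∃ r ∈ R, ∃ j ∈ J, r ≠ j ∧ pvHit r j x) ↔
      ∃ g ∈ pvPairs, ((g.1 ∈ R ∧ g.2.1 ∈ J) ∨ (g.2.1 ∈ R ∧ g.1 ∈ J)) ∧ x = g.2.2 := by
  constructor
  · rintro ⟨r, hr, j, hj, _, g, hg, hm, hx⟩
    refine ⟨g, hg, ?_, hx⟩
    rcases hm with ⟨h1, h2⟩ | ⟨h1, h2⟩
    · subst h1; subst h2; exact Or.inl ⟨hr, hj⟩
    · subst h1; subst h2; exact Or.inr ⟨hr, hj⟩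
  · rintro ⟨g, hg, hc, hx⟩
    have hne : g.1 ≠ g.2.1 := by
      simp only [pvPairs, List.mem_cons, List.not_mem_nil, or_false] at hg
      rcases hg with hg | hg | hg | hg <;> subst hg <;> simp
    rcases hc with ⟨h1, h2⟩ | ⟨h1, h2⟩
    · exact ⟨g.1, h1, g.2.1, h2, hne, g, hg, Or.inl ⟨rfl, rfl⟩, hx⟩
    · exact ⟨g.2.1, h1, g.1, h2, hne.symm, g, hg, Or.inr ⟨rfl, rfl⟩, hx⟩

theorem pv_pairwise_alt (R J : List String) :
    (semantic_matches_from_lists_alt R J).Pairwise (fun a b => a < b) := by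
  unfold semantic_matches_from_lists_alt
  apply List.Pairwise.sublist (List.Sublist.map _ List.filter_sublist)
  show (pvPairs.map (fun g => g.2.2)).Pairwise (fun a b => a < b)
  simp only [pvPairs, List.map_cons, List.map_nil]
  simp
  decide

theorem pv_nodup_alt (R J : List String) : (semantic_matches_from_lists_alt R J).Nodup :=
  (pv_pairwise_alt R J).imp (fun h => ne_of_lt h)

-- ===== VERDICT (by name: the statement is the Claim_ definition above) =====
theorem semantic_matches_from_lists_spec : Claim_equal_semantic_matches_from_lists := by
  intro R J _
  unfold Spec_semantic_matches_from_lists semantic_matches_from_lists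
  apply PySem.List.sorted_eq_of_perm_of_pairwise_lt
  · apply (List.perm_ext_iff_of_nodup (pv_nodup_alt R J)
      (pv_nodup_resumeFold R J PySem.Set.empty List.nodup_nil)).mpr
    intro x
    rw [pv_mem_alt, pv_mem_resumeFold, ← pv_hit_swap]
    simp [PySem.Set.empty]
  · exact pv_pairwise_alt R J
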